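-- pv_equiv track=rewrite | github.com/nikki-muggle/PythonProblems | tester109.py | __no_repeated_digits
-- ===== SOURCE A (Python) =====
-- def __no_repeated_digits(n, allowed):
--     n = str(n)
--     for i in range(4):
--         if n[i] not in allowed:
--             return False
--         for j in range(i+1, 4):
--             if n[i] == n[j]:
--                 return False
--     return True
-- ===== SOURCE B (Python) =====
-- def __no_repeated_digits(n, allowed):
--     n = str(n)
--     seen = set()
--     for i in range(4):
--         c = n[i]
--         if c not in allowed:
--             return False
--         if c in seen:
--             return False
--         seen.add(c)
--     return True
-- ===== Notes on version B (the rewrite author's own statement) =====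
-- stated objective: simpler
-- what changed: The nested all-pairs inner loop comparing n[i] with every later n[j] is removed; B makes one pass over the four digits maintaining a running 'seen' set and rejects on the first digit already seen.
import Mathlib
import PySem

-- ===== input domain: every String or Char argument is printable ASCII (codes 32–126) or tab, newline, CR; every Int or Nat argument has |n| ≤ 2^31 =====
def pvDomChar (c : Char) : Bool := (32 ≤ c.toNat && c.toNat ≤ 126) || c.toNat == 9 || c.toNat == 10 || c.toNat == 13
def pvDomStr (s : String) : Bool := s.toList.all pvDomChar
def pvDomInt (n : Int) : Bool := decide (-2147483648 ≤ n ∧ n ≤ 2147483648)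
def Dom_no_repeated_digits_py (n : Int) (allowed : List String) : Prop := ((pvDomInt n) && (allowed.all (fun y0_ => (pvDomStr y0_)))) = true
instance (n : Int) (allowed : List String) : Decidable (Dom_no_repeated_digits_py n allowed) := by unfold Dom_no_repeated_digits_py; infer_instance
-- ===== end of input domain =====

-- B replaces A's nested all-pairs duplicate scan with one pass over the digits maintaining a 'seen' set (simpler; same cost at k=4).
-- ===== PORT A =====
-- inner loop: 'for j in range(i+1, 4): if n[i] == n[j]: return False' (true = returned False)
def pvADup (s : List Char) (ci : Char) : List Int → Bool
  | [] => false
  | j :: js => if ci = PySem.List.pyGetD s j ' ' then true else pvADup s ci js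

-- outer loop body of A; out-of-range access (Python's IndexError) is excluded by Pre_ below
def pvALoop (s : List Char) (allowed : List String) : List Int → Bool
  | [] => true
  | i :: is =>
    let ci := PySem.List.pyGetD s i ' '
    if !(allowed.contains (String.mk [ci])) then false
    else if pvADup s ci (PySem.List.pyRange (i + 1) 4 1) then false
    else pvALoop s allowed is

def no_repeated_digits_py (n : Int) (allowed : List String) : Bool :=
  pvALoop (PySem.Int.toChars n) allowed (PySem.List.pyRange 0 4 1)

-- ===== PORT B =====
def pvBLoop (s : List Char) (allowed : List String) (seen : PySem.Set Char) : List Int → Bool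
  | [] => true
  | i :: is =>
    let c := PySem.List.pyGetD s i ' '
    if !(allowed.contains (String.mk [c])) then false
    else if PySem.Set.contains seen c then false
    else pvBLoop s allowed (PySem.Set.add seen c) is

def no_repeated_digits_py_alt (n : Int) (allowed : List String) : Bool :=
  pvBLoop (PySem.Int.toChars n) allowed PySem.Set.empty (PySem.List.pyRange 0 4 1)

-- ===== PRECONDITION & SPEC =====
-- Pre_ excludes exactly the inputs where A raises IndexError: str(n) shorter than 4 characters,
-- unless A returns False first (first char not allowed, or the first char repeats at an in-range index).
def Pre_no_repeated_digits_py (n : Int) (allowed : List String) : Prop :=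
  4 ≤ (PySem.Int.toChars n).length ∨
  allowed.contains (String.mk [(PySem.Int.toChars n).getD 0 ' ']) = false ∨
  (∃ j ∈ ([1, 2, 3] : List Nat), j < (PySem.Int.toChars n).length ∧
      (PySem.Int.toChars n).getD 0 ' ' = (PySem.Int.toChars n).getD j ' ')
instance (n : Int) (allowed : List String) : Decidable (Pre_no_repeated_digits_py n allowed) := by
  unfold Pre_no_repeated_digits_py; infer_instance
def pvWitness_no_repeated_digits_py : Int × List String := (1234, ["1", "2", "3", "4"])

def Spec_no_repeated_digits_py (n : Int) (allowed : List String) (out : Bool) : Prop := out = no_repeated_digits_py_alt n allowed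
instance (n : Int) (allowed : List String) (out : Bool) : Decidable (Spec_no_repeated_digits_py n allowed out) := by unfold Spec_no_repeated_digits_py; infer_instance

-- ===== CLAIM (what is proved, stated in full; the proofs are below) =====
def Claim_equal_no_repeated_digits_py : Prop := ∀ (n : Int) (allowed : List String), Dom_no_repeated_digits_py n allowed → Pre_no_repeated_digits_py n allowed → Spec_no_repeated_digits_py n allowed (no_repeated_digits_py n allowed)

-- ===== LEMMAS AND PROOFS =====
-- A and B agree as total functions of the four scanned characters (the agreement does not even
-- need Pre_, which only delimits where the Lean ports are faithful to the Python programs).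
lemma pv_key (s : List Char) (allowed : List String) :
    pvALoop s allowed (PySem.List.pyRange 0 4 1) =
      pvBLoop s allowed PySem.Set.empty (PySem.List.pyRange 0 4 1) := by
  have h0 : PySem.List.pyRange 0 4 1 = [0, 1, 2, 3] := by decide
  have h1 : PySem.List.pyRange (0 + 1) 4 1 = [1, 2, 3] := by decide
  have h2 : PySem.List.pyRange (1 + 1) 4 1 = [2, 3] := by decide
  have h3 : PySem.List.pyRange (2 + 1) 4 1 = [3] := by decide
  have h4 : PySem.List.pyRange (3 + 1) 4 1 = [] := by decide
  simp only [h0, h1, h2, h3, h4, pvALoop, pvBLoop, pvADup,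
    PySem.Set.empty, PySem.Set.add, PySem.Set.contains]
  generalize PySem.List.pyGetD s 0 ' ' = c0
  generalize PySem.List.pyGetD s 1 ' ' = c1
  generalize PySem.List.pyGetD s 2 ' ' = c2
  generalize PySem.List.pyGetD s 3 ' ' = c3
  by_cases e01 : c0 = c1 <;> by_cases e02 : c0 = c2 <;> by_cases e03 : c0 = c3 <;>
    by_cases e12 : c1 = c2 <;> by_cases e13 : c1 = c3 <;> by_cases e23 : c2 = c3 <;>
    simp_all <;>
    by_cases m0 : allowed.contains (String.mk [c0]) <;>
    by_cases m1 : allowed.contains (String.mk [c1]) <;>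
    by_cases m2 : allowed.contains (String.mk [c2]) <;>
    by_cases m3 : allowed.contains (String.mk [c3]) <;> simp_all [ne_comm]

-- ===== VERDICT (by name: the statement is the Claim_ definition above) =====
theorem no_repeated_digits_py_spec : Claim_equal_no_repeated_digits_py := by
  intro n allowed _ _
  unfold Spec_no_repeated_digits_py no_repeated_digits_py no_repeated_digits_py_alt
  exact pv_key _ _
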